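-- pv_equiv track=rewrite | github.com/Mcnores-Samuel/alx-higher_level_programming | 0x03-python-data_structures/7-add_tuple.py | process_tuple
-- ===== SOURCE A (Python) =====
-- def process_tuple(tuple_a=()):
--     """Checks if a tuple has no value or only one and one value.
--
--     args:
--         tuple_a: a tuple to process or add a value(s).
--     Returns: a new tuple of two values.
--     """
--     if not tuple_a or len(tuple_a) == 1:
--         tuple_a = list(tuple_a)
--         for n in range(2):
--             if tuple_a and tuple_a[0] and len(tuple_a) == 1:
--                 tuple_a.insert(1, 0)
--             else:
--                 if len(tuple_a) < 2:
--                     tuple_a.append(0)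
--             n += 1
--         tuple_a = tuple(tuple_a)
--     else:
--         if len(tuple_a) > 2:
--             tuple_a = list(tuple_a)
--             tuple_a = [tuple_a[n] for n in range(2)]
--             tuple_a = tuple(tuple_a)
--     return tuple_a
-- ===== SOURCE B (Python) =====
-- def process_tuple(tuple_a=()):
--     """Pull exactly two values from the tuple, defaulting missing ones to 0."""
--     it = iter(tuple_a)
--     first = next(it, 0)
--     second = next(it, 0)
--     return (first, second)
-- ===== Notes on version B (the rewrite author's own statement) =====
-- stated objective: simpler
-- what changed: Drops A's length tests, listcomp copy and two-iteration insert/append loop entirely: B lazily pulls two items from an iterator with default 0, never inspecting len or building a list.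
import Mathlib
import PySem

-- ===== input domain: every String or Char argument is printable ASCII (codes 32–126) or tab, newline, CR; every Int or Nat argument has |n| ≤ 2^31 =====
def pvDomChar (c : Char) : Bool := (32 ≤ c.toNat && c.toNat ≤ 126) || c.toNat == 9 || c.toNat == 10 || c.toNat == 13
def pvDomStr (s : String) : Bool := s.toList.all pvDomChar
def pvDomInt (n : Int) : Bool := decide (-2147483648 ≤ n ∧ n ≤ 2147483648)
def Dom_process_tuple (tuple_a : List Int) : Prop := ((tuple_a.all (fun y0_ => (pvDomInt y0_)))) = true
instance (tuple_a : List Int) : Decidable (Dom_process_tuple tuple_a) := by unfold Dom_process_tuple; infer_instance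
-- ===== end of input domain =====

-- B replaces A's length tests and insert/append loop with two iterator pulls defaulting to 0; return-value equivalence only (A may return the argument object itself when its length is 2).

-- ===== PORT A =====
-- the body of A's `for n in range(2)` loop, applied to the current list state
def ptLoopBody (l : List Int) : List Int :=
  if l ≠ [] ∧ l.headI ≠ 0 ∧ l.length = 1 then
    PySem.List.insert l 1 0
  else if l.length < 2 then l ++ [0] else l

-- final `tuple(...)` of a length-2 list as the Int × Int tuple
def ptPair (l : List Int) : Int × Int := (l.headI, l.tail.headI)

def process_tuple (tuple_a : List Int) : Int × Int :=
  if tuple_a = [] ∨ tuple_a.length = 1 then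
    ptPair (ptLoopBody (ptLoopBody tuple_a))
  else
    if 2 < tuple_a.length then
      ptPair ((PySem.List.pyRange 0 2 1).filterMap (fun n => PySem.List.pyGet? tuple_a n))
    else
      ptPair tuple_a

-- ===== PORT B =====
-- `it = iter(tuple_a); first = next(it, 0); second = next(it, 0)`:
-- the first pull is the head (default 0), the second pull is the head of the rest (default 0)
def process_tuple_alt (tuple_a : List Int) : Int × Int :=
  let first := tuple_a.headD 0
  let second := (tuple_a.drop 1).headD 0
  (first, second)

-- ===== PRECONDITION & SPEC =====
def Spec_process_tuple (tuple_a : List Int) (out : Int × Int) : Prop := out = process_tuple_alt tuple_a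
instance (tuple_a : List Int) (out : Int × Int) : Decidable (Spec_process_tuple tuple_a out) := by unfold Spec_process_tuple; infer_instance

-- ===== CLAIM (what is proved, stated in full; the proofs are below) =====
def Claim_equal_process_tuple : Prop := ∀ (tuple_a : List Int), Dom_process_tuple tuple_a → Spec_process_tuple tuple_a (process_tuple tuple_a)

-- ===== LEMMAS AND PROOFS =====

-- ===== VERDICT (by name: the statement is the Claim_ definition above) =====
theorem process_tuple_spec : Claim_equal_process_tuple := by
  intro l _
  unfold Spec_process_tuple process_tuple process_tuple_alt ptLoopBody ptPair
  match l with
  | [] => decide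
  | [a] =>
    by_cases h : a = 0
    · simp [h]
    · have hins : PySem.List.insert [a] (1:Int) 0 = [a, 0] := by
        rw [show ((1:Int)) = (((1:Nat):Int)) from rfl, PySem.List.insert_natCast _ 1 0 (by simp)]
        rfl
      simp [h, hins]
  | [a, b] => simp
  | a :: b :: c :: rest =>
    have hr : PySem.List.pyRange 0 2 1 = [0, 1] := by decide
    have h0 : PySem.List.pyGet? (a :: b :: c :: rest) 0 = some a := by
      simp [PySem.List.pyGet?, PySem.List.pyIdx?]
      rw [if_pos (by positivity)]
      rfl
    have h1 : PySem.List.pyGet? (a :: b :: c :: rest) 1 = some b := by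
      simp [PySem.List.pyGet?, PySem.List.pyIdx?]
      rw [if_pos (by positivity)]
      rfl
    simp [hr, List.filterMap, h0, h1]
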